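-- pv_equiv track=rewrite | github.com/timotheeg/tetris_ctm_summary | score_utils.py | getPacePotentialForLevel
-- ===== SOURCE A (Python) =====
-- SCORE_BASES = [0, 40, 100, 300, 1200]
--
-- TRANSITIONS = {
--     "0": 10,
--     "1": 20,
--     "2": 30,
--     "3": 40,
--     "4": 50,
--     "5": 60,
--     "6": 70,
--     "7": 80,
--     "8": 90,
--     "9": 100,
--     "10": 100,
--     "11": 100,
--     "12": 100,
--     "13": 100,
--     "14": 100,
--     "15": 100,
--     "16": 110,
--     "17": 120,
--     "18": 130,
--     "19": 130,
-- }
--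
-- def getClearValue(level, clear):
--     return SCORE_BASES[clear] * (level + 1)
--
-- def getTransitionLines(start_level):
--     return TRANSITIONS[str(start_level)]
--
-- def getLevel(start_level, lines):
--     transition_lines = getTransitionLines(start_level)
--
--     if lines < transition_lines:
--         level = start_level
--     else:
--         level = start_level + 1 + int((lines - transition_lines) / 10)
--
--     return level
--
-- def getPacePotentialForLevel(start_level, transition_lines, kill_screen_lines):
--     def clearScore(current_lines, clear):
--         target_lines = current_lines + clear
--
--         level = getLevel(start_level, target_lines)
--
--         return getClearValue(level, clear)
--
--     potential = {}
--     potential[kill_screen_lines + 0] = 0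
--     potential[kill_screen_lines + 1] = 0
--     potential[kill_screen_lines + 2] = 0
--     potential[kill_screen_lines + 3] = 0
--
--     lines = kill_screen_lines
--
--     while lines:
--         lines -= 1
--
--         best_score = 0
--
--         for clear in (1, 2, 3, 4):
--             new_score = clearScore(lines, clear) + potential[clear + lines]
--
--             if new_score > best_score:
--                 best_score = new_score
--
--         potential[lines] = best_score
--
--     return potential
-- ===== SOURCE B (Python) =====
-- # B: top-down memoized recursion over line counts (a helper that looks up / fills a memo)
-- # instead of A's explicit backward while-loop DP; driven over each start index so the
-- # recursion stays shallow and every key gets inserted in the same order.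
-- SCORE_BASES = [0, 40, 100, 300, 1200]
--
-- TRANSITIONS = {
--     "0": 10, "1": 20, "2": 30, "3": 40, "4": 50, "5": 60, "6": 70,
--     "7": 80, "8": 90, "9": 100, "10": 100, "11": 100, "12": 100,
--     "13": 100, "14": 100, "15": 100, "16": 110, "17": 120, "18": 130, "19": 130,
-- }
--
-- def getClearValue(level, clear):
--     return SCORE_BASES[clear] * (level + 1)
--
-- def getTransitionLines(start_level):
--     return TRANSITIONS[str(start_level)]
--
-- def getLevel(start_level, lines):
--     transition_lines = getTransitionLines(start_level)
--     if lines < transition_lines: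
--         level = start_level
--     else:
--         level = start_level + 1 + int((lines - transition_lines) / 10)
--     return level
--
-- def getPacePotentialForLevel(start_level, transition_lines, kill_screen_lines):
--     ks = kill_screen_lines
--     memo = {}
--     for i in (0, 1, 2, 3):
--         memo[ks + i] = 0
--
--     def helper(lines):
--         if lines in memo:
--             return memo[lines]
--         best = max(getClearValue(getLevel(start_level, lines + clear), clear) + helper(lines + clear)
--                    for clear in (1, 2, 3, 4))
--         memo[lines] = best
--         return best
--
--     for lines in range(ks - 1, -1, -1):
--         helper(lines)
--     return memo
-- ===== Notes on version B (the rewrite author's own statement) =====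
-- stated objective: alternative
-- what changed: Replaces A's explicit backward while-loop DP with a top-down memoized recursive helper over line counts (memo seeded with the four kill-screen keys), driven over each start index so every key is filled.
import Mathlib
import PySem

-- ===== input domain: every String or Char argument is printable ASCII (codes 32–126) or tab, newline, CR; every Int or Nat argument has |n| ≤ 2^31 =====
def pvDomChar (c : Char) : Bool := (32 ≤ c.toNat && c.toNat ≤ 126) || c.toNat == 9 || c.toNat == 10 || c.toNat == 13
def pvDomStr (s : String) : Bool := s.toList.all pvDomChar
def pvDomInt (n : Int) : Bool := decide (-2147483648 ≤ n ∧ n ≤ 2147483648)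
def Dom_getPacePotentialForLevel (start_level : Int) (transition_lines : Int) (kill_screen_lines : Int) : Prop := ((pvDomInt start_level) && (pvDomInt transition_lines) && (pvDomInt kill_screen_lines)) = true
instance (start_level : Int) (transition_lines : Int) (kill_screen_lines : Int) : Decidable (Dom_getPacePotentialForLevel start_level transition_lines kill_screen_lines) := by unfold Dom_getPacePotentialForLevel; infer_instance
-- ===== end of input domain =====

-- B replaces A's explicit backward while-loop DP with a top-down memoized
-- recursive helper over line counts (objective: alternative decomposition, same cost).

-- ===== PORT A =====
def pvSCORE_BASES : List Int := [0, 40, 100, 300, 1200]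

def pvTRANSITIONS : PySem.Dict String Int :=
  PySem.Dict.ofList [("0", 10), ("1", 20), ("2", 30), ("3", 40), ("4", 50), ("5", 60), ("6", 70),
    ("7", 80), ("8", 90), ("9", 100), ("10", 100), ("11", 100), ("12", 100), ("13", 100),
    ("14", 100), ("15", 100), ("16", 110), ("17", 120), ("18", 130), ("19", 130)]

def pvGetClearValue (level clear : Int) : Int :=
  -- SCORE_BASES[clear]: in-range at every call site (clear ∈ {1,2,3,4}); default unreachable
  (PySem.List.pyGet? pvSCORE_BASES clear).getD 0 * (level + 1)

def pvGetTransitionLines (start_level : Int) : Int :=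
  -- TRANSITIONS[str(start_level)] raises KeyError outside 0..19: excluded by Pre_, default unreachable
  (pvTRANSITIONS.get? (PySem.Int.toStr start_level)).getD 0

def pvGetLevel (start_level lines : Int) : Int :=
  let transition_lines := pvGetTransitionLines start_level
  if lines < transition_lines then start_level
  -- int((lines - transition_lines) / 10): exact as floor division here since the else-branch
  -- guarantees lines - transition_lines ≥ 0 (and |…| ≤ 2^32 on Dom, so the float is exact enough)
  else start_level + 1 + PySem.Int.floordiv (lines - transition_lines) 10

def pvClearScore (start_level current_lines clear : Int) : Int :=
  pvGetClearValue (pvGetLevel start_level (current_lines + clear)) clear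

-- the `while lines:` loop; fuel = kill_screen_lines.toNat (Pre_ gives 0 ≤ kill_screen_lines,
-- otherwise the Python loop never terminates)
def pvALoop (start_level : Int) : Nat → Int → PySem.Dict Int Int → PySem.Dict Int Int
  | 0, _, potential => potential
  | f + 1, lines, potential =>
    let lines := lines - 1
    let best_score := [(1 : Int), 2, 3, 4].foldl
      (fun best_score clear =>
        let new_score := pvClearScore start_level lines clear + potential.getD (clear + lines) 0
        if new_score > best_score then new_score else best_score) 0
    pvALoop start_level f lines (potential.insert lines best_score)

def getPacePotentialForLevel (start_level : Int) (transition_lines : Int) (kill_screen_lines : Int) : List (Int × Int) :=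
  let potential := ((((PySem.Dict.empty).insert (kill_screen_lines + 0) 0).insert
    (kill_screen_lines + 1) 0).insert (kill_screen_lines + 2) 0).insert (kill_screen_lines + 3) 0
  (pvALoop start_level kill_screen_lines.toNat kill_screen_lines potential).items

-- ===== PORT B =====
-- the memoized recursive helper(lines); fuel only makes the recursion structural
-- (any fuel larger than the actual recursion depth computes the Python value)
def pvHelper (start_level : Int) : Nat → Int → PySem.Dict Int Int → Int × PySem.Dict Int Int
  | 0, _, memo => (0, memo)  -- out of fuel: unreachable at the fuel the driver supplies
  | f + 1, lines, memo =>
    match memo.get? lines with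
    | some v => (v, memo)
    | none =>
      let (r1, m1) := pvHelper start_level f (lines + 1) memo
      let c1 := pvGetClearValue (pvGetLevel start_level (lines + 1)) 1 + r1
      let (r2, m2) := pvHelper start_level f (lines + 2) m1
      let c2 := pvGetClearValue (pvGetLevel start_level (lines + 2)) 2 + r2
      let (r3, m3) := pvHelper start_level f (lines + 3) m2
      let c3 := pvGetClearValue (pvGetLevel start_level (lines + 3)) 3 + r3
      let (r4, m4) := pvHelper start_level f (lines + 4) m3
      let c4 := pvGetClearValue (pvGetLevel start_level (lines + 4)) 4 + r4
      let best := max (max (max c1 c2) c3) c4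
      (best, m4.insert lines best)

-- for lines in range(ks-1, -1, -1): helper(lines)
def pvBDrive (start_level : Int) (fl : Nat) : Nat → Int → PySem.Dict Int Int → PySem.Dict Int Int
  | 0, _, memo => memo
  | f + 1, lines, memo => pvBDrive start_level fl f (lines - 1) (pvHelper start_level fl lines memo).2

def getPacePotentialForLevel_alt (start_level : Int) (transition_lines : Int) (kill_screen_lines : Int) : List (Int × Int) :=
  let ks := kill_screen_lines
  let memo := PySem.Dict.ofList [(ks, (0 : Int)), (ks + 1, 0), (ks + 2, 0), (ks + 3, 0)]
  (pvBDrive start_level (ks.toNat + 5) ks.toNat (ks - 1) memo).items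

-- ===== PRECONDITION & SPEC =====
-- A's `while lines:` loop never terminates for kill_screen_lines < 0, and whenever the loop body
-- runs (kill_screen_lines > 0) A raises KeyError on TRANSITIONS[str(start_level)] unless
-- 0 ≤ start_level ≤ 19; Pre_ excludes exactly those inputs.
def Pre_getPacePotentialForLevel (start_level : Int) (transition_lines : Int) (kill_screen_lines : Int) : Prop :=
  0 ≤ kill_screen_lines ∧ (kill_screen_lines = 0 ∨ (0 ≤ start_level ∧ start_level ≤ 19))
instance (start_level : Int) (transition_lines : Int) (kill_screen_lines : Int) : Decidable (Pre_getPacePotentialForLevel start_level transition_lines kill_screen_lines) := by unfold Pre_getPacePotentialForLevel; infer_instance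

def pvWitness_getPacePotentialForLevel : Int × Int × Int := (5, 60, 130)

def Spec_getPacePotentialForLevel (start_level : Int) (transition_lines : Int) (kill_screen_lines : Int) (out : List (Int × Int)) : Prop := out = getPacePotentialForLevel_alt start_level transition_lines kill_screen_lines
instance (start_level : Int) (transition_lines : Int) (kill_screen_lines : Int) (out : List (Int × Int)) : Decidable (Spec_getPacePotentialForLevel start_level transition_lines kill_screen_lines out) := by unfold Spec_getPacePotentialForLevel; infer_instance

-- ===== CLAIM =====
def Claim_equal_getPacePotentialForLevel : Prop := ∀ (start_level : Int) (transition_lines : Int) (kill_screen_lines : Int), Dom_getPacePotentialForLevel start_level transition_lines kill_screen_lines → Pre_getPacePotentialForLevel start_level transition_lines kill_screen_lines → Spec_getPacePotentialForLevel start_level transition_lines kill_screen_lines (getPacePotentialForLevel start_level transition_lines kill_screen_lines)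

-- ===== LEMMAS AND PROOFS =====
lemma pvGetLevel_nonneg (s x : Int) (hs : 0 ≤ s) : 0 ≤ pvGetLevel s x := by
  by_cases h : x < pvGetTransitionLines s
  · simp [pvGetLevel, h]; exact hs
  · have h10 : (0:Int) < 10 := by norm_num
    simp only [pvGetLevel, h, if_false]
    rw [PySem.Int.floordiv_eq_ediv_of_pos h10]
    have := Int.ediv_nonneg (a := x - pvGetTransitionLines s) (b := 10) (by omega) (by omega)
    omega

lemma pvGetClearValue_nonneg (level clear : Int) (hl : 0 ≤ level) (hc : clear ∈ [(1:Int),2,3,4]) :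
    0 ≤ pvGetClearValue level clear := by
  unfold pvGetClearValue
  fin_cases hc <;>
    simp [pvSCORE_BASES, PySem.List.pyGet?, PySem.List.pyIdx?] <;> omega

-- a memo hit: one unit of fuel suffices
lemma pvHelper_hit (s : Int) (f : Nat) (L v : Int) (d : PySem.Dict Int Int)
    (h : d.get? L = some v) : pvHelper s (f + 1) L d = (v, d) := by
  simp [pvHelper, h]

-- a memo miss whose four successors are all hits returns the max of the four candidates
lemma pvHelper_miss (s : Int) (f : Nat) (L v1 v2 v3 v4 : Int) (d : PySem.Dict Int Int)
    (h0 : d.get? L = none)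
    (g1 : d.get? (L + 1) = some v1) (g2 : d.get? (L + 2) = some v2)
    (g3 : d.get? (L + 3) = some v3) (g4 : d.get? (L + 4) = some v4) :
    pvHelper s (f + 2) L d =
      (max (max (max (pvGetClearValue (pvGetLevel s (L + 1)) 1 + v1)
                     (pvGetClearValue (pvGetLevel s (L + 2)) 2 + v2))
                (pvGetClearValue (pvGetLevel s (L + 3)) 3 + v3))
           (pvGetClearValue (pvGetLevel s (L + 4)) 4 + v4),
       d.insert L (max (max (max (pvGetClearValue (pvGetLevel s (L + 1)) 1 + v1)
                     (pvGetClearValue (pvGetLevel s (L + 2)) 2 + v2))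
                (pvGetClearValue (pvGetLevel s (L + 3)) 3 + v3))
           (pvGetClearValue (pvGetLevel s (L + 4)) 4 + v4))) := by
  show pvHelper s ((f + 1) + 1) L d = _
  rw [pvHelper]
  rw [h0]
  simp only [pvHelper_hit s f _ _ _ g1, pvHelper_hit s f _ _ _ g2,
    pvHelper_hit s f _ _ _ g3, pvHelper_hit s f _ _ _ g4]

-- main loop equivalence, by induction on the remaining iterations, with the invariant that
-- the memo has exactly the keys above the current line, the next four holding nonneg values
lemma pvLoop_eq (s : Int) (hs : 0 ≤ s) : ∀ (f fl : Nat) (L : Int) (d : PySem.Dict Int Int),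
    (∀ i : Int, i ≤ L - 1 → d.get? i = none) →
    (∀ j : Int, j ∈ [(0:Int),1,2,3] → ∃ v, d.get? (L + j) = some v ∧ 0 ≤ v) →
    pvALoop s f L d = pvBDrive s (fl + 2) f (L - 1) d := by
  intro f
  induction f with
  | zero => intro fl L d _ _; rfl
  | succ f ih =>
    intro fl L d hnone hsome
    obtain ⟨v1, g1, n1⟩ := hsome 0 (by simp)
    rw [show L + (0:Int) = L by ring] at g1
    obtain ⟨v2, g2, n2⟩ := hsome 1 (by simp)
    obtain ⟨v3, g3, n3⟩ := hsome 2 (by simp)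
    obtain ⟨v4, g4, n4⟩ := hsome 3 (by simp)
    have w1 : (L - 1) + 1 = L := by ring
    have w2 : (L - 1) + 2 = L + 1 := by ring
    have w3 : (L - 1) + 3 = L + 2 := by ring
    have w4 : (L - 1) + 4 = L + 3 := by ring
    set a1 := pvGetClearValue (pvGetLevel s L) 1 with ha1
    set a2 := pvGetClearValue (pvGetLevel s (L + 1)) 2 with ha2
    set a3 := pvGetClearValue (pvGetLevel s (L + 2)) 3 with ha3
    set a4 := pvGetClearValue (pvGetLevel s (L + 3)) 4 with ha4
    have p1 : 0 ≤ a1 := pvGetClearValue_nonneg _ _ (pvGetLevel_nonneg s _ hs) (by simp)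
    have p2 : 0 ≤ a2 := pvGetClearValue_nonneg _ _ (pvGetLevel_nonneg s _ hs) (by simp)
    have p3 : 0 ≤ a3 := pvGetClearValue_nonneg _ _ (pvGetLevel_nonneg s _ hs) (by simp)
    have p4 : 0 ≤ a4 := pvGetClearValue_nonneg _ _ (pvGetLevel_nonneg s _ hs) (by simp)
    set best := max (max (max (a1 + v1) (a2 + v2)) (a3 + v3)) (a4 + v4) with hb
    have hbn : 0 ≤ best := by
      have h1 : a1 + v1 ≤ best := le_trans (le_max_left _ _)
        (le_trans (le_max_left _ _) (le_max_left _ _))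
      omega
    -- A's accumulator fold equals the bare max since every candidate is nonnegative
    have hbestA :
        ([(1 : Int), 2, 3, 4].foldl
          (fun best_score clear =>
            let new_score := pvClearScore s (L - 1) clear + d.getD (clear + (L - 1)) 0
            if new_score > best_score then new_score else best_score) 0) = best := by
      have e1 : (1 : Int) + (L - 1) = L := by ring
      have e2 : (2 : Int) + (L - 1) = L + 1 := by ring
      have e3 : (3 : Int) + (L - 1) = L + 2 := by ring
      have e4 : (4 : Int) + (L - 1) = L + 3 := by ring
      have d1 : d.getD L 0 = v1 := by simp [PySem.Dict.getD, g1]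
      have d2 : d.getD (L + 1) 0 = v2 := by simp [PySem.Dict.getD, g2]
      have d3 : d.getD (L + 2) 0 = v3 := by simp [PySem.Dict.getD, g3]
      have d4 : d.getD (L + 3) 0 = v4 := by simp [PySem.Dict.getD, g4]
      simp only [List.foldl, pvClearScore, e1, e2, e3, e4, w1, w2, w3, w4, d1, d2, d3, d4,
        ← ha1, ← ha2, ← ha3, ← ha4, hb]
      simp only [max_def]
      split_ifs <;> omega
    have hstepB : pvHelper s (fl + 2) (L - 1) d = (best, d.insert (L - 1) best) := by
      rw [pvHelper_miss s fl (L - 1) v1 v2 v3 v4 d (hnone (L - 1) le_rfl)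
        (by rw [w1]; exact g1) (by rw [w2]; exact g2) (by rw [w3]; exact g3)
        (by rw [w4]; exact g4)]
      simp only [w1, w2, w3, w4, ← ha1, ← ha2, ← ha3, ← ha4, ← hb]
    show pvALoop s (f + 1) L d = pvBDrive s (fl + 2) (f + 1) (L - 1) d
    rw [pvALoop, pvBDrive, hstepB, hbestA]
    refine ih fl (L - 1) (d.insert (L - 1) best) ?_ ?_
    · intro i hi
      rw [PySem.Dict.get?_insert, if_neg (by omega)]
      exact hnone i (by omega)
    · intro j hj
      fin_cases hj
      · exact ⟨best, by rw [PySem.Dict.get?_insert]; simp, hbn⟩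
      · exact ⟨v1, by rw [show L - 1 + 1 = L by ring, PySem.Dict.get?_insert,
          if_neg (by omega)]; exact g1, n1⟩
      · exact ⟨v2, by rw [show L - 1 + 2 = L + 1 by ring, PySem.Dict.get?_insert,
          if_neg (by omega)]; exact g2, n2⟩
      · exact ⟨v3, by rw [show L - 1 + 3 = L + 2 by ring, PySem.Dict.get?_insert,
          if_neg (by omega)]; exact g3, n3⟩

lemma pvD0_get? (k i : Int) :
    (PySem.Dict.ofList [(k, (0:Int)), (k + 1, 0), (k + 2, 0), (k + 3, 0)]).get? i =
      if i = k ∨ i = k + 1 ∨ i = k + 2 ∨ i = k + 3 then some 0 else none := by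
  simp only [PySem.Dict.ofList, PySem.Dict.update, List.foldl, PySem.Dict.get?_insert,
    PySem.Dict.get?_empty]
  split_ifs <;> first | rfl | omega

-- ===== VERDICT =====
theorem getPacePotentialForLevel_spec : Claim_equal_getPacePotentialForLevel := by
  intro s t k _ hpre
  obtain ⟨hk, hcase⟩ := hpre
  unfold Spec_getPacePotentialForLevel getPacePotentialForLevel getPacePotentialForLevel_alt
  have hd0 : ((((PySem.Dict.empty).insert (k + 0) 0).insert (k + 1) 0).insert (k + 2) 0).insert (k + 3) 0
      = PySem.Dict.ofList [(k, (0:Int)), (k + 1, 0), (k + 2, 0), (k + 3, 0)] := by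
    simp [PySem.Dict.ofList, PySem.Dict.update]
  simp only [hd0]
  rcases hcase with h0 | ⟨hs, _⟩
  · subst h0
    rfl
  have h5 : k.toNat + 5 = (k.toNat + 3) + 2 := by omega
  rw [h5]
  rw [pvLoop_eq s hs k.toNat (k.toNat + 3) k _
    (fun i hi => by rw [pvD0_get?]; rw [if_neg (by omega)])
    (fun j hj => ⟨0, by rw [pvD0_get?]; rw [if_pos (by fin_cases hj <;> omega)], le_rfl⟩)]
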